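-- pv_equiv track=rewrite | github.com/cn-vhql/BabyClaw | src/copaw/app/crons/models.py | _crontab_dow_to_name
-- ===== SOURCE A (Python) =====
-- _CRONTAB_NUM_TO_NAME: dict[str, str] = {
--     "0": "sun",
--     "1": "mon",
--     "2": "tue",
--     "3": "wed",
--     "4": "thu",
--     "5": "fri",
--     "6": "sat",
--     "7": "sun",
-- }
--
-- def _crontab_dow_to_name(field: str) -> str:
--     """Convert the day-of-week field from crontab numbers to abbreviations.
--
--     Handles: ``*``, single values, comma-separated lists, and ranges.
--     Already-named values (``mon``, ``tue``, …) are passed through unchanged.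
--     """
--     if field == "*":
--         return field
--
--     def _convert_token(tok: str) -> str:
--         if "/" in tok:
--             base, step = tok.rsplit("/", 1)
--             return f"{_convert_token(base)}/{step}"
--         if "-" in tok:
--             parts = tok.split("-", 1)
--             return "-".join(_CRONTAB_NUM_TO_NAME.get(p, p) for p in parts)
--         return _CRONTAB_NUM_TO_NAME.get(tok, tok)
--
--     return ",".join(_convert_token(t) for t in field.split(","))
-- ===== SOURCE B (Python) =====
-- _CRONTAB_NUM_TO_NAME: dict[str, str] = {
--     "0": "sun",
--     "1": "mon",
--     "2": "tue",
--     "3": "wed",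
--     "4": "thu",
--     "5": "fri",
--     "6": "sat",
--     "7": "sun",
-- }
--
-- def _crontab_dow_to_name(field: str) -> str:
--     """Convert the day-of-week field from crontab numbers to abbreviations.
--
--     Single character-level scan (a small state machine) instead of any
--     split/join: state 0 collects the first dash-piece of a token's base,
--     state 1 the rest of the base, state 2 copies everything after the first
--     '/' verbatim; collected pieces are mapped through the table when flushed.
--     """
--     if field == "*":
--         return field
--
--     out = []
--     buf = []
--     state = 0  # 0: before first '-' of base, 1: rest of base, 2: after '/'
--
--     def flush():
--         s = "".join(buf)
--         out.append(_CRONTAB_NUM_TO_NAME.get(s, s))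
--         buf.clear()
--
--     for ch in field:
--         if ch == ",":
--             if state != 2:
--                 flush()
--             out.append(",")
--             state = 0
--         elif state == 2:
--             out.append(ch)
--         elif ch == "/":
--             flush()
--             out.append("/")
--             state = 2
--         elif ch == "-" and state == 0:
--             flush()
--             out.append("-")
--             state = 1
--         else:
--             buf.append(ch)
--     if state != 2:
--         flush()
--     return "".join(out)
-- ===== Notes on version B (the rewrite author's own statement) =====
-- stated objective: alternative
-- what changed: Replaces A's split/rsplit/join token processing with a single character-level scan: a three-state machine (first dash-piece of a token's base, rest of the base, verbatim after the first '/') that flushes dict-mapped buffers at delimiters, so no split, rsplit, partition or recursion is used at all.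
import Mathlib
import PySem

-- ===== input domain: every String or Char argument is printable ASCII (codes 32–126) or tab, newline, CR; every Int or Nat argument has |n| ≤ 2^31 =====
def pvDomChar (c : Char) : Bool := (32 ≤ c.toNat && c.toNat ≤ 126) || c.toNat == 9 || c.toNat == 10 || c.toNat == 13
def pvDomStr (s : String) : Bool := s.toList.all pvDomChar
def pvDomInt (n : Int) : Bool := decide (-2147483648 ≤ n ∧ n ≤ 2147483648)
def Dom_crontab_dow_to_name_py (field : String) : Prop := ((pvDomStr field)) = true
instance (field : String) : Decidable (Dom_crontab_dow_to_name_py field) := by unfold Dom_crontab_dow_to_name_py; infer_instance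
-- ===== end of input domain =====

-- B replaces A's split/rsplit/join token processing by one character-level scan with a
-- three-state machine that flushes dict-mapped buffers at delimiters; objective: alternative.

-- ===== PORT A =====

-- the module-level dict _CRONTAB_NUM_TO_NAME (keys/values as char lists)
def pvDowDict : PySem.Dict (List Char) (List Char) :=
  PySem.Dict.mk [(['0'], ['s','u','n']), (['1'], ['m','o','n']), (['2'], ['t','u','e']),
                 (['3'], ['w','e','d']), (['4'], ['t','h','u']), (['5'], ['f','r','i']),
                 (['6'], ['s','a','t']), (['7'], ['s','u','n'])]

-- termination fact for pvConvTokA's recursion on the rsplit base (above the port because the port cites it)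
theorem pvRsplitBase_lt (cs : List Char) (h : '/' ∈ cs) :
    ((cs.reverse.dropWhile (fun d => d ≠ '/')).tail).reverse.length < cs.length := by
  have hne : cs.reverse.dropWhile (fun d => d ≠ '/') ≠ [] := by
    intro hnil
    have hsp := List.takeWhile_append_dropWhile (p := fun d => d ≠ '/') (l := cs.reverse)
    rw [hnil, List.append_nil] at hsp
    have hmem : '/' ∈ cs.reverse.takeWhile (fun d => d ≠ '/') := by
      rw [hsp]; exact List.mem_reverse.mpr h
    have := List.mem_takeWhile_imp hmem
    simp at this
  have h1 : (cs.reverse.dropWhile (fun d => d ≠ '/')).length ≤ cs.length := by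
    simpa using List.length_dropWhile_le (p := fun d => d ≠ '/') (l := cs.reverse)
  have h2 : ((cs.reverse.dropWhile (fun d => d ≠ '/')).tail).length
      < (cs.reverse.dropWhile (fun d => d ≠ '/')).length := by
    cases hd : cs.reverse.dropWhile (fun d => d ≠ '/') with
    | nil => exact absurd hd hne
    | cons a t => simp
  simp only [List.length_reverse]
  omega

-- _convert_token of A; tok.rsplit("/", 1) is ported by hand as the span of the reversed
-- token (PySem has no rsplit with maxsplit): exact for the one-char separator with '/' ∈ tok.
def pvConvTokA (cs : List Char) : List Char :=
  if h : '/' ∈ cs then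
    pvConvTokA ((cs.reverse.dropWhile (fun d => d ≠ '/')).tail).reverse
      ++ '/' :: (cs.reverse.takeWhile (fun d => d ≠ '/')).reverse
  else if '-' ∈ cs then
    PySem.Chars.join ['-']
      ((PySem.Chars.splitOnMax cs ['-'] 1).map (fun p => pvDowDict.getD p p))
  else pvDowDict.getD cs cs
termination_by cs.length
decreasing_by simpa using pvRsplitBase_lt cs h

def crontab_dow_to_name_py (field : String) : String :=
  if field == "*" then field
  else String.ofList (PySem.Chars.join [',']
    ((PySem.Chars.splitOn field.toList [',']).map pvConvTokA))

-- ===== PORT B =====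

-- flush(): append the dict-mapped buffer to out (the buffer is then reset at each call site)
def pvFlushB (out buf : List Char) : List Char :=
  out ++ pvDowDict.getD buf buf

-- the loop body of B: state is (out, buf, state) with state 0 = first dash-piece of the
-- token's base, 1 = rest of the base, 2 = after the first '/' (verbatim copy)
def pvStepB (st : List Char × List Char × Nat) (ch : Char) : List Char × List Char × Nat :=
  if ch = ',' then
    if st.2.2 ≠ 2 then (pvFlushB st.1 st.2.1 ++ [','], [], 0)
    else (st.1 ++ [','], st.2.1, 0)
  else if st.2.2 = 2 then (st.1 ++ [ch], st.2.1, st.2.2)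
  else if ch = '/' then (pvFlushB st.1 st.2.1 ++ ['/'], [], 2)
  else if ch = '-' ∧ st.2.2 = 0 then (pvFlushB st.1 st.2.1 ++ ['-'], [], 1)
  else (st.1, st.2.1 ++ [ch], st.2.2)

def crontab_dow_to_name_py_alt (field : String) : String :=
  if field == "*" then field
  else
    let r := field.toList.foldl pvStepB ([], [], 0)
    String.ofList (if r.2.2 ≠ 2 then pvFlushB r.1 r.2.1 else r.1)

-- ===== PRECONDITION & SPEC =====
def Spec_crontab_dow_to_name_py (field : String) (out : String) : Prop := out = crontab_dow_to_name_py_alt field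
instance (field : String) (out : String) : Decidable (Spec_crontab_dow_to_name_py field out) := by unfold Spec_crontab_dow_to_name_py; infer_instance

-- ===== CLAIM (what is proved, stated in full; the proofs are below) =====
def Claim_equal_crontab_dow_to_name_py : Prop := ∀ (field : String), Dom_crontab_dow_to_name_py field → Spec_crontab_dow_to_name_py field (crontab_dow_to_name_py field)

-- ===== LEMMAS AND PROOFS =====

-- ---- generic takeWhile/dropWhile facts ----

theorem pvTakeWhileAppendAll {p : Char → Bool} (xs ys : List Char) (h : ∀ x ∈ xs, p x) :
    (xs ++ ys).takeWhile p = xs ++ ys.takeWhile p := by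
  induction xs with
  | nil => simp
  | cons a t ih =>
    rw [List.cons_append, List.takeWhile_cons_of_pos (h a List.mem_cons_self),
        ih (fun x hx => h x (List.mem_cons_of_mem a hx))]
    rfl

theorem pvDropWhileAppendAll {p : Char → Bool} (xs ys : List Char) (h : ∀ x ∈ xs, p x) :
    (xs ++ ys).dropWhile p = ys.dropWhile p := by
  induction xs with
  | nil => simp
  | cons a t ih =>
    rw [List.cons_append, List.dropWhile_cons_of_pos (h a List.mem_cons_self),
        ih (fun x hx => h x (List.mem_cons_of_mem a hx))]

theorem pvNotMemP (c : Char) (xs : List Char) (h : c ∉ xs) : ∀ x ∈ xs, (x ≠ c : Bool) := by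
  intro x hx
  have : x ≠ c := fun he => h (he ▸ hx)
  simpa using this

theorem pvTakeWhileSelf (cs : List Char) (h : ¬ '/' ∈ cs) :
    cs.takeWhile (fun d => d ≠ '/') = cs :=
  List.takeWhile_eq_self_iff.mpr (pvNotMemP '/' cs h)

theorem pvDropWhileNil (cs : List Char) (h : ¬ '/' ∈ cs) :
    cs.dropWhile (fun d => d ≠ '/') = [] :=
  List.dropWhile_eq_nil_iff.mpr (fun a ha => by simpa using pvNotMemP '/' cs h a ha)

theorem pvDropWhileEqCons {p : Char → Bool} :
    ∀ (l : List Char) a t, l.dropWhile p = a :: t → p a = false := by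
  intro l
  induction l with
  | nil => intro a t h; simp at h
  | cons x r ih =>
    intro a t h
    by_cases hx : p x
    · rw [List.dropWhile_cons_of_pos hx] at h; exact ih a t h
    · rw [List.dropWhile_cons_of_neg hx] at h; cases h; simpa using hx

-- the span at '/' of base ++ '/' :: step stops at or before the appended separator
theorem pvTakeWhileAppend (base step : List Char) :
    (base ++ '/' :: step).takeWhile (fun d => d ≠ '/') = base.takeWhile (fun d => d ≠ '/') := by
  induction base with
  | nil => simp [List.takeWhile]
  | cons x t ih =>
    by_cases hx : x = '/'
    · subst hx
      rw [List.cons_append, List.takeWhile_cons_of_neg (by simp), List.takeWhile_cons_of_neg (by simp)]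
    · rw [List.cons_append, List.takeWhile_cons_of_pos (by simp [hx]),
          List.takeWhile_cons_of_pos (by simp [hx]), ih]

theorem pvDropWhileAppend (base step : List Char) :
    (base ++ '/' :: step).dropWhile (fun d => d ≠ '/') =
      base.dropWhile (fun d => d ≠ '/') ++ '/' :: step := by
  induction base with
  | nil => simp [List.dropWhile]
  | cons x t ih =>
    by_cases hx : x = '/'
    · subst hx
      rw [List.cons_append, List.dropWhile_cons_of_neg (by simp), List.dropWhile_cons_of_neg (by simp)]
      simp
    · rw [List.cons_append, List.dropWhile_cons_of_pos (by simp [hx]),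
          List.dropWhile_cons_of_pos (by simp [hx]), ih]

-- ---- s.split(c, 1) characterised (used to evaluate A's token conversion) ----

theorem pvGoZero (c : Char) (fuel : Nat) (l cur : List Char) (acc : List (List Char)) :
    PySem.Chars.splitOnMax.go [c] fuel 0 l cur acc = acc.reverse ++ [cur.reverse ++ l] := by
  rw [PySem.Chars.splitOnMax.go.eq_def]
  cases fuel with
  | zero => simp
  | succ f => cases l <;> simp

theorem pvGoOne (c : Char) (l : List Char) :
    ∀ (fuel : Nat) (cur : List Char) (acc : List (List Char)), l.length < fuel →
    PySem.Chars.splitOnMax.go [c] fuel 1 l cur acc =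
      if c ∈ l then
        acc.reverse ++ [cur.reverse ++ l.takeWhile (fun d => d ≠ c),
                        (l.dropWhile (fun d => d ≠ c)).tail]
      else acc.reverse ++ [cur.reverse ++ l] := by
  induction l with
  | nil =>
    intro fuel cur acc hf
    cases fuel with
    | zero => omega
    | succ f => rw [PySem.Chars.splitOnMax.go.eq_def]; simp
  | cons x rest ih =>
    intro fuel cur acc hf
    cases fuel with
    | zero => omega
    | succ f =>
      rw [PySem.Chars.splitOnMax.go.eq_def]
      simp only [List.isPrefixOf, Bool.and_true]
      rw [if_neg (one_ne_zero)]
      by_cases hx : c = x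
      · subst hx
        rw [if_pos (by simp)]
        show PySem.Chars.splitOnMax.go [c] f 0 rest [] (cur.reverse :: acc) = _
        rw [pvGoZero]
        rw [if_pos (List.mem_cons_self)]
        rw [List.takeWhile_cons_of_neg (by simp), List.dropWhile_cons_of_neg (by simp)]
        simp
      · have hbeq : (c == x) = false := by simp [hx]
        rw [if_neg (by simp [hbeq])]
        rw [ih f (x :: cur) acc (by simpa using Nat.lt_of_succ_lt_succ hf)]
        rw [List.takeWhile_cons_of_pos (by simp [Ne.symm hx]), List.dropWhile_cons_of_pos (by simp [Ne.symm hx])]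
        by_cases hc : c ∈ rest
        · rw [if_pos hc, if_pos (by simp [hc])]; simp
        · rw [if_neg hc, if_neg (by simp [hc, hx])]; simp

theorem pvSplitOnMaxOne (c : Char) (cs : List Char) :
    PySem.Chars.splitOnMax cs [c] 1 =
      if c ∈ cs then [cs.takeWhile (fun d => d ≠ c), (cs.dropWhile (fun d => d ≠ c)).tail]
      else [cs] := by
  unfold PySem.Chars.splitOnMax
  rw [if_neg (by omega), show ((1:Int).toNat) = 1 from rfl]
  rw [pvGoOne c cs (cs.length + 1) [] [] (by omega)]
  split <;> simp

-- ---- s.split(c) characterised by the structural pvSplit1 ----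

def pvSplit1 (c : Char) (pre : List Char) : List Char → List (List Char)
  | [] => [pre]
  | x :: r => if x = c then pre :: pvSplit1 c [] r else pvSplit1 c (pre ++ [x]) r

theorem pvGoSplit (c : Char) (l : List Char) :
    ∀ (fuel : Nat) (cur : List Char) (acc : List (List Char)), l.length < fuel →
    PySem.Chars.splitOn.go [c] fuel l cur acc = acc.reverse ++ pvSplit1 c cur.reverse l := by
  induction l with
  | nil =>
    intro fuel cur acc hf
    cases fuel with
    | zero => omega
    | succ f => rw [PySem.Chars.splitOn.go.eq_def]; simp [pvSplit1]
  | cons x rest ih =>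
    intro fuel cur acc hf
    cases fuel with
    | zero => omega
    | succ f =>
      rw [PySem.Chars.splitOn.go.eq_def]
      simp only [List.isPrefixOf, Bool.and_true]
      by_cases hx : c = x
      · subst hx
        rw [if_pos (by simp)]
        show PySem.Chars.splitOn.go [c] f rest [] (cur.reverse :: acc) = _
        rw [ih f [] (cur.reverse :: acc) (by simpa using Nat.lt_of_succ_lt_succ hf)]
        simp [pvSplit1]
      · have hbeq : (c == x) = false := by simp [hx]
        rw [if_neg (by simp [hbeq])]
        rw [ih f (x :: cur) acc (by simpa using Nat.lt_of_succ_lt_succ hf)]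
        simp [pvSplit1, Ne.symm hx]

theorem pvSplitOnEq (c : Char) (cs : List Char) :
    PySem.Chars.splitOn cs [c] = pvSplit1 c [] cs := by
  unfold PySem.Chars.splitOn
  rw [pvGoSplit c cs (cs.length + 1) [] [] (by omega)]
  simp

theorem pvSplit1NoSep (c : Char) : ∀ (t pre : List Char), c ∉ t → pvSplit1 c pre t = [pre ++ t] := by
  intro t
  induction t with
  | nil => intro pre _; simp [pvSplit1]
  | cons x r ih =>
    intro pre h
    have hx : ¬ x = c := fun he => h (he ▸ List.mem_cons_self)
    rw [pvSplit1, if_neg hx, ih (pre ++ [x]) (fun hm => h (List.mem_cons_of_mem x hm))]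
    simp

theorem pvSplit1Sep (c : Char) :
    ∀ (t pre rest : List Char), c ∉ t →
      pvSplit1 c pre (t ++ c :: rest) = (pre ++ t) :: pvSplit1 c [] rest := by
  intro t
  induction t with
  | nil => intro pre rest _; simp [pvSplit1]
  | cons x r ih =>
    intro pre rest h
    have hx : ¬ x = c := fun he => h (he ▸ List.mem_cons_self)
    rw [List.cons_append, pvSplit1, if_neg hx,
        ih (pre ++ [x]) rest (fun hm => h (List.mem_cons_of_mem x hm))]
    simp

theorem pvSplit1NeNil (c : Char) : ∀ (t pre : List Char), pvSplit1 c pre t ≠ [] := by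
  intro t
  induction t with
  | nil => intro pre; simp [pvSplit1]
  | cons x r ih =>
    intro pre
    rw [pvSplit1]
    split
    · simp
    · exact ih (pre ++ [x])

-- ---- the per-token value of B's machine, as structural functions (proof helpers) ----

mutual
def pvRes0 (buf : List Char) : List Char → List Char
  | [] => pvDowDict.getD buf buf
  | c :: cs =>
    if c = ',' then pvDowDict.getD buf buf ++ ',' :: pvRes0 [] cs
    else if c = '/' then pvDowDict.getD buf buf ++ '/' :: pvRes2 [] cs
    else if c = '-' then pvDowDict.getD buf buf ++ '-' :: pvRes1 [] cs
    else pvRes0 (buf ++ [c]) cs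
def pvRes1 (buf : List Char) : List Char → List Char
  | [] => pvDowDict.getD buf buf
  | c :: cs =>
    if c = ',' then pvDowDict.getD buf buf ++ ',' :: pvRes0 [] cs
    else if c = '/' then pvDowDict.getD buf buf ++ '/' :: pvRes2 [] cs
    else pvRes1 (buf ++ [c]) cs
def pvRes2 (buf : List Char) : List Char → List Char
  | [] => []
  | c :: cs => if c = ',' then ',' :: pvRes0 buf cs else c :: pvRes2 buf cs
end

-- finish step of B
def pvFinB (r : List Char × List Char × Nat) : List Char :=
  if r.2.2 ≠ 2 then pvFlushB r.1 r.2.1 else r.1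

-- B's fold equals the structural functions, in each of the three states
theorem pvFoldRes (cs : List Char) :
    ∀ (out buf : List Char),
      (pvFinB (cs.foldl pvStepB (out, buf, 0)) = out ++ pvRes0 buf cs)
    ∧ (pvFinB (cs.foldl pvStepB (out, buf, 1)) = out ++ pvRes1 buf cs)
    ∧ (pvFinB (cs.foldl pvStepB (out, buf, 2)) = out ++ pvRes2 buf cs) := by
  induction cs with
  | nil =>
    intro out buf
    refine ⟨?_, ?_, ?_⟩ <;> simp [pvFinB, pvFlushB, pvRes0, pvRes1, pvRes2]
  | cons c cs ih =>
    intro out buf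
    refine ⟨?_, ?_, ?_⟩
    · rw [List.foldl_cons]
      by_cases hc : c = ','
      · subst hc
        show pvFinB (cs.foldl pvStepB (pvStepB (out, buf, 0) ',')) = _
        rw [show pvStepB (out, buf, 0) ',' = (pvFlushB out buf ++ [','], [], 0) by
          simp [pvStepB]]
        rw [(ih _ _).1, pvRes0]
        simp [pvFlushB]
      · by_cases hs : c = '/'
        · subst hs
          rw [show pvStepB (out, buf, 0) '/' = (pvFlushB out buf ++ ['/'], [], 2) by
            simp [pvStepB]]
          rw [(ih _ _).2.2, pvRes0]
          simp [pvFlushB, hc]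
        · by_cases hd : c = '-'
          · subst hd
            rw [show pvStepB (out, buf, 0) '-' = (pvFlushB out buf ++ ['-'], [], 1) by
              simp [pvStepB]]
            rw [(ih _ _).2.1, pvRes0]
            simp [pvFlushB, hc, hs]
          · rw [show pvStepB (out, buf, 0) c = (out, buf ++ [c], 0) by
              simp [pvStepB, hc, hs, hd]]
            rw [(ih _ _).1, pvRes0]
            simp [hc, hs, hd]
    · rw [List.foldl_cons]
      by_cases hc : c = ','
      · subst hc
        rw [show pvStepB (out, buf, 1) ',' = (pvFlushB out buf ++ [','], [], 0) by
          simp [pvStepB]]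
        rw [(ih _ _).1, pvRes1]
        simp [pvFlushB]
      · by_cases hs : c = '/'
        · subst hs
          rw [show pvStepB (out, buf, 1) '/' = (pvFlushB out buf ++ ['/'], [], 2) by
            simp [pvStepB]]
          rw [(ih _ _).2.2, pvRes1]
          simp [pvFlushB, hc]
        · rw [show pvStepB (out, buf, 1) c = (out, buf ++ [c], 1) by
            simp [pvStepB, hc, hs]]
          rw [(ih _ _).2.1, pvRes1]
          simp [hc, hs]
    · rw [List.foldl_cons]
      by_cases hc : c = ','
      · subst hc
        rw [show pvStepB (out, buf, 2) ',' = (out ++ [','], buf, 0) by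
          simp [pvStepB]]
        rw [(ih _ _).1, pvRes2]
        simp
      · rw [show pvStepB (out, buf, 2) c = (out ++ [c], buf, 2) by
          simp [pvStepB, hc]]
        rw [(ih _ _).2.2, pvRes2]
        simp [hc]

-- ---- A's token converter rewritten without recursion (pvConvTokB), and its agreement with A ----

def pvConvTokB (cs : List Char) : List Char :=
  PySem.Chars.join ['-']
    ((PySem.Chars.splitOnMax (cs.takeWhile (fun d => d ≠ '/')) ['-'] 1).map
      (fun p => pvDowDict.getD p p))
  ++ cs.dropWhile (fun d => d ≠ '/')

-- when '/' ∈ cs, cs is the rsplit base ++ '/' :: step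
theorem pvRsplitDecomp (cs : List Char) (h : '/' ∈ cs) :
    cs = ((cs.reverse.dropWhile (fun d => d ≠ '/')).tail).reverse
          ++ '/' :: (cs.reverse.takeWhile (fun d => d ≠ '/')).reverse := by
  have hsp := List.takeWhile_append_dropWhile (p := fun d => d ≠ '/') (l := cs.reverse)
  have hne : cs.reverse.dropWhile (fun d => d ≠ '/') ≠ [] := by
    intro hnil
    rw [hnil, List.append_nil] at hsp
    have hmem : '/' ∈ cs.reverse.takeWhile (fun d => d ≠ '/') := by
      rw [hsp]; exact List.mem_reverse.mpr h
    have := List.mem_takeWhile_imp hmem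
    simp at this
  cases hd : cs.reverse.dropWhile (fun d => d ≠ '/') with
  | nil => exact absurd hd hne
  | cons a t =>
    have ha : a = '/' := by
      have := pvDropWhileEqCons cs.reverse a t hd
      simpa using this
    subst ha
    rw [hd] at hsp
    conv_lhs => rw [← List.reverse_reverse cs, ← hsp]
    simp

theorem pvConvTokBAppend (base step : List Char) :
    pvConvTokB (base ++ '/' :: step) = pvConvTokB base ++ '/' :: step := by
  unfold pvConvTokB
  rw [pvTakeWhileAppend, pvDropWhileAppend, List.append_assoc]

theorem pvConvTokEq (cs : List Char) : pvConvTokA cs = pvConvTokB cs := by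
  induction cs using pvConvTokA.induct with
  | case1 cs h ih =>
    simp only [List.unattach_reverse, List.unattach_attach] at ih
    rw [pvConvTokA, dif_pos h, ih, ← pvConvTokBAppend]
    exact congrArg pvConvTokB (pvRsplitDecomp cs h).symm
  | case2 cs h hm =>
    rw [pvConvTokA, dif_neg h, if_pos hm]
    unfold pvConvTokB
    rw [pvTakeWhileSelf cs h, pvDropWhileNil cs h, List.append_nil]
  | case3 cs h hm =>
    rw [pvConvTokA, dif_neg h, if_neg hm]
    unfold pvConvTokB
    rw [pvTakeWhileSelf cs h, pvDropWhileNil cs h, List.append_nil, pvSplitOnMaxOne, if_neg hm]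
    rw [List.map_singleton, PySem.Chars.join_singleton]

-- pvConvTokB of a token without '-' or '/' is a plain dict lookup
theorem pvConvTokBPlain (buf : List Char) (hd : '-' ∉ buf) (hs : '/' ∉ buf) :
    pvConvTokB buf = pvDowDict.getD buf buf := by
  unfold pvConvTokB
  rw [pvTakeWhileSelf buf hs, pvDropWhileNil buf hs, List.append_nil, pvSplitOnMaxOne, if_neg hd]
  rw [List.map_singleton, PySem.Chars.join_singleton]

-- ---- the machine's structural functions compute pvConvTokB on one token ----

theorem pvRes2NoComma (cs : List Char) : ∀ buf, ',' ∉ cs → pvRes2 buf cs = cs := by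
  induction cs with
  | nil => intro buf _; rw [pvRes2]
  | cons c cs ih =>
    intro buf h
    have hc : ¬ c = ',' := fun he => h (he ▸ List.mem_cons_self)
    rw [pvRes2, if_neg hc, ih buf (fun hm => h (List.mem_cons_of_mem c hm))]

theorem pvRes1NoComma (cs : List Char) :
    ∀ buf, '/' ∉ buf → ',' ∉ cs →
      pvRes1 buf cs =
        pvDowDict.getD (buf ++ cs.takeWhile (fun d => d ≠ '/'))
                       (buf ++ cs.takeWhile (fun d => d ≠ '/'))
          ++ cs.dropWhile (fun d => d ≠ '/') := by
  induction cs with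
  | nil => intro buf _ _; rw [pvRes1]; simp [List.takeWhile, List.dropWhile]
  | cons c cs ih =>
    intro buf hb h
    have hc : ¬ c = ',' := fun he => h (he ▸ List.mem_cons_self)
    have htail : ',' ∉ cs := fun hm => h (List.mem_cons_of_mem c hm)
    by_cases hs : c = '/'
    · subst hs
      rw [pvRes1, if_neg hc, if_pos rfl, pvRes2NoComma cs [] htail]
      rw [List.takeWhile_cons_of_neg (by simp), List.dropWhile_cons_of_neg (by simp)]
      simp
    · rw [pvRes1, if_neg hc, if_neg hs,
          ih (buf ++ [c]) (by simp [hb, Ne.symm hs]) htail]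
      rw [List.takeWhile_cons_of_pos (by simp [hs]), List.dropWhile_cons_of_pos (by simp [hs])]
      simp

theorem pvRes0NoComma (cs : List Char) :
    ∀ buf, '-' ∉ buf → '/' ∉ buf → ',' ∉ cs →
      pvRes0 buf cs = pvConvTokB (buf ++ cs) := by
  induction cs with
  | nil =>
    intro buf hd hs _
    rw [pvRes0, List.append_nil, pvConvTokBPlain buf hd hs]
  | cons c cs ih =>
    intro buf hd hs h
    have hc : ¬ c = ',' := fun he => h (he ▸ List.mem_cons_self)
    have htail : ',' ∉ cs := fun hm => h (List.mem_cons_of_mem c hm)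
    by_cases hsl : c = '/'
    · subst hsl
      rw [pvRes0, if_neg hc, if_pos rfl, pvRes2NoComma cs [] htail]
      rw [pvConvTokBAppend buf cs, pvConvTokBPlain buf hd hs]
    · by_cases hda : c = '-'
      · subst hda
        rw [pvRes0, if_neg hc, if_neg hsl, if_pos rfl,
            pvRes1NoComma cs [] (by simp) htail]
        unfold pvConvTokB
        rw [pvTakeWhileAppendAll buf ('-' :: cs) (pvNotMemP '/' buf hs),
            pvDropWhileAppendAll buf ('-' :: cs) (pvNotMemP '/' buf hs)]
        rw [List.takeWhile_cons_of_pos (by simp), List.dropWhile_cons_of_pos (by simp)]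
        rw [pvSplitOnMaxOne, if_pos (by simp [List.mem_append])]
        rw [pvTakeWhileAppendAll buf ('-' :: cs.takeWhile (fun d => d ≠ '/'))
              (pvNotMemP '-' buf hd),
            pvDropWhileAppendAll buf ('-' :: cs.takeWhile (fun d => d ≠ '/'))
              (pvNotMemP '-' buf hd)]
        rw [List.takeWhile_cons_of_neg (by simp), List.dropWhile_cons_of_neg (by simp)]
        simp [PySem.Chars.join_cons_cons, PySem.Chars.join_singleton]
      · rw [pvRes0, if_neg hc, if_neg hsl, if_neg hda,
            ih (buf ++ [c]) (by simp [hd, Ne.symm hda]) (by simp [hs, Ne.symm hsl]) htail]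
        simp

-- ---- decomposition at the first comma ----

theorem pvRes2Comma (t : List Char) :
    ∀ buf rest, ',' ∉ t → pvRes2 buf (t ++ ',' :: rest) = t ++ ',' :: pvRes0 buf rest := by
  induction t with
  | nil => intro buf rest _; rw [List.nil_append, pvRes2, if_pos rfl]; rfl
  | cons c t ih =>
    intro buf rest h
    have hc : ¬ c = ',' := fun he => h (he ▸ List.mem_cons_self)
    rw [List.cons_append, pvRes2, if_neg hc, ih buf rest (fun hm => h (List.mem_cons_of_mem c hm))]
    rfl

theorem pvRes1Comma (t : List Char) :
    ∀ buf rest, '/' ∉ buf → ',' ∉ t →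
      pvRes1 buf (t ++ ',' :: rest) =
        pvDowDict.getD (buf ++ t.takeWhile (fun d => d ≠ '/'))
                       (buf ++ t.takeWhile (fun d => d ≠ '/'))
          ++ t.dropWhile (fun d => d ≠ '/') ++ ',' :: pvRes0 [] rest := by
  induction t with
  | nil =>
    intro buf rest _ _
    rw [List.nil_append, pvRes1, if_pos rfl]
    simp [List.takeWhile, List.dropWhile]
  | cons c t ih =>
    intro buf rest hb h
    have hc : ¬ c = ',' := fun he => h (he ▸ List.mem_cons_self)
    have htail : ',' ∉ t := fun hm => h (List.mem_cons_of_mem c hm)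
    by_cases hs : c = '/'
    · subst hs
      rw [List.cons_append, pvRes1, if_neg hc, if_pos rfl, pvRes2Comma t [] rest htail]
      rw [List.takeWhile_cons_of_neg (by simp), List.dropWhile_cons_of_neg (by simp)]
      simp
    · rw [List.cons_append, pvRes1, if_neg hc, if_neg hs,
          ih (buf ++ [c]) rest (by simp [hb, Ne.symm hs]) htail]
      rw [List.takeWhile_cons_of_pos (by simp [hs]), List.dropWhile_cons_of_pos (by simp [hs])]
      simp

theorem pvRes0Comma (t : List Char) :
    ∀ buf rest, '-' ∉ buf → '/' ∉ buf → ',' ∉ t →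
      pvRes0 buf (t ++ ',' :: rest) = pvConvTokB (buf ++ t) ++ ',' :: pvRes0 [] rest := by
  induction t with
  | nil =>
    intro buf rest hd hs _
    rw [List.nil_append, pvRes0, if_pos rfl, List.append_nil, pvConvTokBPlain buf hd hs]
  | cons c t ih =>
    intro buf rest hd hs h
    have hc : ¬ c = ',' := fun he => h (he ▸ List.mem_cons_self)
    have htail : ',' ∉ t := fun hm => h (List.mem_cons_of_mem c hm)
    by_cases hsl : c = '/'
    · subst hsl
      rw [List.cons_append, pvRes0, if_neg hc, if_pos rfl, pvRes2Comma t [] rest htail]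
      rw [pvConvTokBAppend buf t, pvConvTokBPlain buf hd hs]
      simp
    · by_cases hda : c = '-'
      · subst hda
        rw [List.cons_append, pvRes0, if_neg hc, if_neg hsl, if_pos rfl,
            pvRes1Comma t [] rest (by simp) htail]
        unfold pvConvTokB
        rw [pvTakeWhileAppendAll buf ('-' :: t) (pvNotMemP '/' buf hs),
            pvDropWhileAppendAll buf ('-' :: t) (pvNotMemP '/' buf hs)]
        rw [List.takeWhile_cons_of_pos (by simp), List.dropWhile_cons_of_pos (by simp)]
        rw [pvSplitOnMaxOne, if_pos (by simp [List.mem_append])]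
        rw [pvTakeWhileAppendAll buf ('-' :: t.takeWhile (fun d => d ≠ '/'))
              (pvNotMemP '-' buf hd),
            pvDropWhileAppendAll buf ('-' :: t.takeWhile (fun d => d ≠ '/'))
              (pvNotMemP '-' buf hd)]
        rw [List.takeWhile_cons_of_neg (by simp), List.dropWhile_cons_of_neg (by simp)]
        simp [PySem.Chars.join_cons_cons, PySem.Chars.join_singleton]
      · rw [List.cons_append, pvRes0, if_neg hc, if_neg hsl, if_neg hda,
          ih (buf ++ [c]) rest (by simp [hd, Ne.symm hda]) (by simp [hs, Ne.symm hsl]) htail]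
        simp

-- ---- the main correspondence: machine value = join of per-token conversions ----

theorem pvMain (cs : List Char) :
    pvRes0 [] cs = PySem.Chars.join [','] ((PySem.Chars.splitOn cs [',']).map pvConvTokA) := by
  induction hn : cs.length using Nat.strong_induction_on generalizing cs with
  | _ n ih =>
    subst hn
    by_cases h : ',' ∈ cs
    · have hdec : cs = cs.takeWhile (fun d => d ≠ ',') ++ ',' ::
          (cs.dropWhile (fun d => d ≠ ',')).tail := by
        have hsp := List.takeWhile_append_dropWhile (p := fun d => d ≠ ',') (l := cs)
        cases hd : cs.dropWhile (fun d => d ≠ ',') with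
        | nil =>
          exfalso
          have := List.dropWhile_eq_nil_iff.mp hd ',' h
          simp at this
        | cons a tl =>
          have ha : a = ',' := by
            have := pvDropWhileEqCons cs a tl hd
            simpa using this
          subst ha
          conv_lhs => rw [← hsp, hd]
          rfl
      set t := cs.takeWhile (fun d => d ≠ ',') with ht
      set rest := (cs.dropWhile (fun d => d ≠ ',')).tail with hrest
      have htc : ',' ∉ t := by
        intro hm
        have := List.mem_takeWhile_imp hm
        simp at this
      have hlen : rest.length < cs.length := by
        conv_rhs => rw [hdec]
        simp
        omega
      rw [hdec, pvRes0Comma t [] rest (by simp) (by simp) htc, List.nil_append]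
      rw [pvSplitOnEq, pvSplit1Sep ',' t [] rest htc, List.nil_append]
      rw [ih rest.length hlen rest rfl, pvSplitOnEq]
      rw [List.map_cons]
      cases hs1 : pvSplit1 ',' [] rest with
      | nil => exact absurd hs1 (pvSplit1NeNil ',' rest [])
      | cons q qs =>
        rw [List.map_cons, PySem.Chars.join_cons_cons, ← List.map_cons]
        rw [pvConvTokEq t, ← hs1]
        simp
    · rw [pvRes0NoComma cs [] (by simp) (by simp) h, List.nil_append]
      rw [pvSplitOnEq, pvSplit1NoSep ',' cs [] h, List.nil_append, List.map_singleton,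
          PySem.Chars.join_singleton, pvConvTokEq cs]

-- ===== VERDICT (by name: the statement is the Claim_ definition above) =====
theorem crontab_dow_to_name_py_spec : Claim_equal_crontab_dow_to_name_py := by
  intro field _
  unfold Spec_crontab_dow_to_name_py crontab_dow_to_name_py crontab_dow_to_name_py_alt
  by_cases h : field == "*"
  · rw [if_pos h, if_pos h]
  · rw [if_neg h, if_neg h]
    show String.ofList _ = String.ofList (pvFinB (field.toList.foldl pvStepB ([], [], 0)))
    rw [(pvFoldRes field.toList [] []).1, List.nil_append, pvMain]
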